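-- pv_equiv track=rewrite | github.com/mysql/mysql-utilities | mysql/utilities/common/format.py | convert_dictionary_list
-- ===== SOURCE A (Python) =====
-- def convert_dictionary_list(dict_list):
--     """Convert a dictionary to separated lists of keys and values.
--
--     Convert the list of items of the given dictionary (i.e. pairs key, value)
--     to a set of columns containing the keys and a set of rows containing the
--     values.
--
--     dict_list[in]    Dictionary with a list of items to convert
--
--     Returns tuple - (columns, rows)
--     """
--     cols = []
--     rows = []
--     # First, get a list of the columns
--     for node in dict_list:
--         for key in node.keys():
--             if key not in cols:
--                 cols.append(key)
--
--     # Now form the rows replacing missing columns with None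
--     for node in dict_list:
--         row = []
--         for col in cols:
--             row.append(node.get(col, None))
--         rows.append(row)
--
--     return (cols, rows)
-- ===== SOURCE B (Python) =====
-- def convert_dictionary_list(dict_list):
--     """One-pass variant: grow cols while building rows, padding old rows
--     with None whenever a new column appears."""
--     cols = []
--     rows = []
--     for node in dict_list:
--         for key in node.keys():
--             if key not in cols:
--                 cols.append(key)
--                 for row in rows:
--                     row.append(None)
--         rows.append([node.get(col, None) for col in cols])
--     return (cols, rows)
-- ===== Notes on version B (the rewrite author's own statement) =====
-- stated objective: alternative
-- what changed: Replaces A's two separate passes (collect all columns, then build every row) by a single pass that builds each row as its node is seen and back-pads the already-built rows with None when a new column first appears.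
import Mathlib
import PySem

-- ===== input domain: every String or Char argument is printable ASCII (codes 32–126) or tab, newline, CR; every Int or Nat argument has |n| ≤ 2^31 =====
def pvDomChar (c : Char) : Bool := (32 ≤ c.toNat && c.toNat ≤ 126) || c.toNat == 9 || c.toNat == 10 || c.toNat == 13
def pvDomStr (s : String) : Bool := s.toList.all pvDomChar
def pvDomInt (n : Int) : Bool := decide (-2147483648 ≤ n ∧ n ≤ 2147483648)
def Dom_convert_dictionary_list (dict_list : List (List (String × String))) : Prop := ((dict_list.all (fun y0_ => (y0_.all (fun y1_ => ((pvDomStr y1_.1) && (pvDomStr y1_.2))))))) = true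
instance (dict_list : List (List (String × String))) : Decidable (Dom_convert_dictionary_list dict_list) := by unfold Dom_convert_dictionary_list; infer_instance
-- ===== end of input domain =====

-- ===== PORT A =====
-- B builds the same (cols, rows) in one pass, padding earlier rows when a new column appears; A makes two passes.
-- node.keys() / node.get(col, None) on the Python dict built from the assoc list
def pvKeys (node : List (String × String)) : List String :=
  (PySem.Dict.ofList node).keys

def pvGet (node : List (String × String)) (col : String) : Option String :=
  (PySem.Dict.ofList node).get? col

-- 'if key not in cols: cols.append(key)'
def pvColStep (cols : List String) (key : String) : List String :=
  if key ∈ cols then cols else cols ++ [key]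

def convert_dictionary_list (dict_list : List (List (String × String))) : List String × List (List (Option String)) :=
  let cols := dict_list.foldl (fun cols node => (pvKeys node).foldl pvColStep cols) []
  let rows := dict_list.foldl
    (fun rows node => rows ++ [cols.foldl (fun row col => row ++ [pvGet node col]) []]) []
  (cols, rows)

-- ===== PORT B =====
-- inner loop of B: grow cols and pad every accumulated row with none for a fresh key
def pvPadStep (st : List String × List (List (Option String))) (key : String) :
    List String × List (List (Option String)) :=
  if key ∈ st.1 then st else (st.1 ++ [key], st.2.map (fun r => r ++ [none]))

def convert_dictionary_list_alt (dict_list : List (List (String × String))) : List String × List (List (Option String)) :=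
  dict_list.foldl
    (fun st node =>
      let st1 := (pvKeys node).foldl pvPadStep st
      (st1.1, st1.2 ++ [st1.1.map (fun col => pvGet node col)]))
    ([], [])

-- ===== PRECONDITION & SPEC =====
def Spec_convert_dictionary_list (dict_list : List (List (String × String))) (out : List String × List (List (Option String))) : Prop := out = convert_dictionary_list_alt dict_list
instance (dict_list : List (List (String × String))) (out : List String × List (List (Option String))) : Decidable (Spec_convert_dictionary_list dict_list out) := by unfold Spec_convert_dictionary_list; infer_instance

-- ===== CLAIM (what is proved, stated in full; the proofs are below) =====
def Claim_equal_convert_dictionary_list : Prop := ∀ (dict_list : List (List (String × String))), Dom_convert_dictionary_list dict_list → Spec_convert_dictionary_list dict_list (convert_dictionary_list dict_list)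

-- ===== LEMMAS AND PROOFS =====

-- appending-in-a-fold is map
theorem foldl_append_singleton {α β : Type} (f : α → β) (xs : List α) (init : List β) :
    xs.foldl (fun r x => r ++ [f x]) init = init ++ xs.map f := by
  induction xs generalizing init with
  | nil => simp
  | cons a t ih => simp [ih]

theorem mem_foldl_colStep {ks cols : List String} {k : String} (h : k ∈ cols) :
    k ∈ ks.foldl pvColStep cols := by
  induction ks generalizing cols with
  | nil => exact h
  | cons a t ih =>
    simp only [List.foldl_cons]
    refine ih ?_
    unfold pvColStep
    split <;> simp [h]

theorem subset_foldl_colStep (ks cols : List String) :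
    ∀ k ∈ ks, k ∈ ks.foldl pvColStep cols := by
  induction ks generalizing cols with
  | nil => intro k hk; simp at hk
  | cons a t ih =>
    intro k hk
    simp only [List.foldl_cons]
    rcases List.mem_cons.mp hk with rfl | hk
    · exact mem_foldl_colStep (by unfold pvColStep; split <;> simp_all)
    · exact ih _ k hk

theorem get_none_of_not_mem {node : List (String × String)} {k : String}
    (h : k ∉ pvKeys node) : pvGet node k = none := by
  unfold pvGet
  unfold pvKeys at h
  exact (PySem.Dict.get?_eq_none_iff_not_mem_keys _ _).mpr h

-- inner fold over one node's keys: cols evolve like A's colStep fold; rows stay "map over cols"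
theorem pad_fold_inv (ks : List String) (cols : List String)
    (l : List (List (String × String)))
    (hsub : ∀ m ∈ l, ∀ k ∈ pvKeys m, k ∈ cols) :
    ks.foldl pvPadStep (cols, l.map (fun m => cols.map (fun c => pvGet m c)))
      = (ks.foldl pvColStep cols,
         l.map (fun m => (ks.foldl pvColStep cols).map (fun c => pvGet m c))) := by
  induction ks generalizing cols with
  | nil => rfl
  | cons a t ih =>
    by_cases ha : a ∈ cols
    · have h1 : pvPadStep (cols, l.map (fun m => cols.map (fun c => pvGet m c))) a
          = (cols, l.map (fun m => cols.map (fun c => pvGet m c))) := by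
        simp [pvPadStep, ha]
      have h2 : pvColStep cols a = cols := by simp [pvColStep, ha]
      simp only [List.foldl_cons, h1, h2]
      exact ih cols hsub
    · have h2 : pvColStep cols a = cols ++ [a] := by simp [pvColStep, ha]
      have hpad : (l.map (fun m => cols.map (fun c => pvGet m c))).map (fun r => r ++ [none])
          = l.map (fun m => (cols ++ [a]).map (fun c => pvGet m c)) := by
        rw [List.map_map]
        refine List.map_congr_left ?_
        intro m hm
        have : pvGet m a = none :=
          get_none_of_not_mem (fun hk => ha (hsub m hm a hk))
        simp [this]
      have h1 : pvPadStep (cols, l.map (fun m => cols.map (fun c => pvGet m c))) a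
          = (cols ++ [a], l.map (fun m => (cols ++ [a]).map (fun c => pvGet m c))) := by
        simp only [pvPadStep]
        rw [if_neg ha, hpad]
      simp only [List.foldl_cons, h1, h2]
      refine ih (cols ++ [a]) ?_
      intro m hm k hk
      exact List.mem_append_left _ (hsub m hm k hk)

-- outer loop invariant for B
theorem alt_fold_inv (rest : List (List (String × String)))
    (cols : List String) (l : List (List (String × String)))
    (hsub : ∀ m ∈ l, ∀ k ∈ pvKeys m, k ∈ cols) :
    rest.foldl
      (fun st node =>
        let st1 := (pvKeys node).foldl pvPadStep st
        (st1.1, st1.2 ++ [st1.1.map (fun col => pvGet node col)]))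
      (cols, l.map (fun m => cols.map (fun c => pvGet m c)))
      = (rest.foldl (fun cs node => (pvKeys node).foldl pvColStep cs) cols,
         (l ++ rest).map (fun m =>
           (rest.foldl (fun cs node => (pvKeys node).foldl pvColStep cs) cols).map
             (fun c => pvGet m c))) := by
  induction rest generalizing cols l with
  | nil => simp
  | cons node tail ih =>
    simp only [List.foldl_cons]
    rw [pad_fold_inv (pvKeys node) cols l hsub]
    have hstep :
        (l.map (fun m => ((pvKeys node).foldl pvColStep cols).map (fun c => pvGet m c)))
          ++ [((pvKeys node).foldl pvColStep cols).map (fun c => pvGet node c)]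
        = (l ++ [node]).map (fun m => ((pvKeys node).foldl pvColStep cols).map (fun c => pvGet m c)) := by
      simp
    simp only [hstep]
    have := ih ((pvKeys node).foldl pvColStep cols) (l ++ [node]) ?_
    · rw [this]
      simp
    · intro m hm k hk
      rcases List.mem_append.mp hm with hm | hm
      · exact mem_foldl_colStep (hsub m hm k hk)
      · simp at hm; subst hm
        exact subset_foldl_colStep _ _ k hk

-- ===== VERDICT (by name: the statement is the Claim_ definition above) =====
theorem convert_dictionary_list_spec : Claim_equal_convert_dictionary_list := by
  intro dict_list _
  unfold Spec_convert_dictionary_list convert_dictionary_list convert_dictionary_list_alt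
  dsimp only
  have hA := alt_fold_inv dict_list [] [] (by intro m hm; simp at hm)
  simp only [List.nil_append, List.map_nil] at hA
  rw [hA]
  refine Prod.ext rfl ?_
  rw [foldl_append_singleton (fun node =>
    (dict_list.foldl (fun cols node => (pvKeys node).foldl pvColStep cols) []).foldl
      (fun row col => row ++ [pvGet node col]) []) dict_list []]
  simp only [List.nil_append]
  refine List.map_congr_left ?_
  intro node _
  rw [foldl_append_singleton (fun col => pvGet node col)]
  simp
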